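-- pv_equiv track=rewrite | github.com/konna-s-brainstorming/quzao-backend | main.py | find_nearest_punctuation
-- ===== SOURCE A (Python) =====
-- def find_nearest_punctuation(text: str, target_len: int = 50):
--     """在目标长度附近查找标点符号位置"""
--     punctuations = ['。', '！', '？', '；', '，', '.', '!', '?', ';', ',']
--
--     if len(text) <= target_len:
--         return len(text) - 1
--
--     search_start = max(0, target_len - 20)
--     search_end = min(len(text), target_len + 20)
--
--     for i in range(target_len, search_end):
--         if i < len(text) and text[i] in punctuations:
--             return i
--
--     for i in range(target_len, search_start - 1, -1):
--         if i < len(text) and text[i] in punctuations: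
--             return i
--
--     return min(target_len, len(text) - 1)
-- ===== SOURCE B (Python) =====
-- def find_nearest_punctuation(text: str, target_len: int = 50):
--     """Build-then-select: collect punctuation indices in the window in one pass,
--     then pick the first at/after target_len, else the last before it."""
--     punctuations = ['。', '！', '？', '；', '，', '.', '!', '?', ';', ',']
--
--     n = len(text)
--     if n <= target_len:
--         return n - 1
--
--     search_start = max(0, target_len - 20)
--     search_end = min(n, target_len + 20)
--
--     hits = [i for i in range(search_start, search_end) if text[i] in punctuations]
--     fwd = [i for i in hits if i >= target_len]
--     if fwd:
--         return fwd[0]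
--     if hits:
--         return hits[-1]
--     return min(target_len, n - 1)
-- ===== Notes on version B (the rewrite author's own statement) =====
-- stated objective: simpler
-- what changed: Replaces A's two directional scan loops with early returns (forward from target_len, then backward) by one pass that collects all punctuation indices in the window, followed by a plain selection: first hit at/after target_len, else last hit before it, else the fallback.
-- outside the precondition, e.g. on find_nearest_punctuation('a a..b', -3): A returns -3, B returns 3; on find_nearest_punctuation('hello, world. more', -30): A raises IndexError, B returns -30
import Mathlib
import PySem

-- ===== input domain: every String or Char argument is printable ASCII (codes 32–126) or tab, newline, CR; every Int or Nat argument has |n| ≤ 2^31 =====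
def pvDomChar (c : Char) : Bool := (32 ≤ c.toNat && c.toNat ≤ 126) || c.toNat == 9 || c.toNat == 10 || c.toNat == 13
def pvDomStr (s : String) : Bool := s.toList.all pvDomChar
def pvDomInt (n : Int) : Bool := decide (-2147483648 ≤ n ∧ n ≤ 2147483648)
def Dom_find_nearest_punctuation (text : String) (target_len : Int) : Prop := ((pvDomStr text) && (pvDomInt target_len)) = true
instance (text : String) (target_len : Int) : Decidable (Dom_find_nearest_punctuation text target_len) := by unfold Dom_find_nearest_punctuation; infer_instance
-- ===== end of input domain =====

-- B replaces A's two directional early-return scans by one collect pass over the window plus a plain selection (simpler decomposition, same cost).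
-- Pre_ restricts to the natural domain 0 ≤ target_len: for negative target_len A indexes the string with negative (Python-wrapping) indices, an accident of the implementation that raises IndexError or returns a wrapped negative index.


-- ===== PORT A =====
def pvPunct : List Char := ['。', '！', '？', '；', '，', '.', '!', '?', ';', ',']

-- A's loop body test: `i < len(text) and text[i] in punctuations` (text[i] via pyGet?, Python's wrap rule)
def pvHitA (cs : List Char) (n i : Int) : Bool :=
  decide (i < n) && (match PySem.List.pyGet? cs i with
                     | some c => pvPunct.contains c
                     | none => false)

def find_nearest_punctuation (text : String) (target_len : Int) : Int :=
  let cs := text.toList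
  let n : Int := cs.length
  if n ≤ target_len then n - 1
  else
    let search_start := max 0 (target_len - 20)
    let search_end := min n (target_len + 20)
    match (PySem.List.pyRange target_len search_end 1).find? (pvHitA cs n) with
    | some i => i
    | none =>
      match (PySem.List.pyRange target_len (search_start - 1) (-1)).find? (pvHitA cs n) with
      | some i => i
      | none => min target_len (n - 1)

-- ===== PORT B =====
-- B's test: `text[i] in punctuations` (indices come from the window, always in range under Pre_)
def pvHitB (cs : List Char) (i : Int) : Bool :=
  match PySem.List.pyGet? cs i with
  | some c => pvPunct.contains c
  | none => false

def find_nearest_punctuation_alt (text : String) (target_len : Int) : Int :=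
  let cs := text.toList
  let n : Int := cs.length
  if n ≤ target_len then n - 1
  else
    let search_start := max 0 (target_len - 20)
    let search_end := min n (target_len + 20)
    let hits := (PySem.List.pyRange search_start search_end 1).filter (pvHitB cs)
    let fwd := hits.filter (fun i => decide (target_len ≤ i))
    match fwd with
    | f :: _ => f
    | [] =>
      match hits.getLast? with
      | some l => l
      | none => min target_len (n - 1)

-- ===== PRECONDITION & SPEC =====
-- Pre_ excludes negative target_len: there A's loops index text with negative Python indices,
-- raising IndexError or returning an accidental wrapped (negative) index; 0 ≤ target_len is the natural domain.
def Pre_find_nearest_punctuation (text : String) (target_len : Int) : Prop := 0 ≤ target_len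
instance (text : String) (target_len : Int) : Decidable (Pre_find_nearest_punctuation text target_len) := by unfold Pre_find_nearest_punctuation; infer_instance

def pvWitness_find_nearest_punctuation : String × Int := ("hello, world. more text", 8)

def Spec_find_nearest_punctuation (text : String) (target_len : Int) (out : Int) : Prop := out = find_nearest_punctuation_alt text target_len
instance (text : String) (target_len : Int) (out : Int) : Decidable (Spec_find_nearest_punctuation text target_len out) := by unfold Spec_find_nearest_punctuation; infer_instance

-- ===== CLAIM (what is proved, stated in full; the proofs are below) =====
def Claim_equal_find_nearest_punctuation : Prop := ∀ (text : String) (target_len : Int), Dom_find_nearest_punctuation text target_len → Pre_find_nearest_punctuation text target_len → Spec_find_nearest_punctuation text target_len (find_nearest_punctuation text target_len)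

-- ===== LEMMAS AND PROOFS =====

-- In the window [ss, se) with se ≤ n, A's guarded test agrees with B's test.
theorem pvHitA_eq_hitB (cs : List Char) (n i : Int) (h : i < n) :
    pvHitA cs n i = pvHitB cs i := by
  simp [pvHitA, pvHitB, h]

theorem find?_eq_head?_filter {α : Type} (p : α → Bool) (l : List α) :
    l.find? p = (l.filter p).head? := by
  induction l with
  | nil => rfl
  | cons x xs ih =>
    by_cases hx : p x = true
    · simp [List.find?, List.filter, hx]
    · simp only [List.find?, List.filter, hx]
      simp only [hx, Bool.false_eq_true, if_false] at *
      exact ih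

theorem find_nearest_punctuation_spec' (text : String) (target_len : Int)
    (hpre : 0 ≤ target_len) :
    find_nearest_punctuation text target_len = find_nearest_punctuation_alt text target_len := by
  unfold find_nearest_punctuation find_nearest_punctuation_alt
  dsimp only
  split_ifs with hle
  · rfl
  · set cs := text.toList with hcs
    set n : Int := (cs.length : Int) with hn
    set ss := max 0 (target_len - 20) with hss
    set se := min n (target_len + 20) with hse
    have h1 : 0 ≤ ss := le_max_left _ _
    have h2 : ss ≤ target_len := by omega
    have h3 : target_len < se := by omega
    have h4 : se ≤ n := min_le_left _ _
    -- window split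
    have hsplit : PySem.List.pyRange ss se 1
        = PySem.List.pyRange ss target_len 1 ++ PySem.List.pyRange target_len se 1 :=
      PySem.List.pyRange_one_append ss target_len se h2 (le_of_lt h3)
    -- A's test agrees with B's on the forward range (indices there are < n)
    have hAfwd : (PySem.List.pyRange target_len se 1).find? (pvHitA cs n)
        = (PySem.List.pyRange target_len se 1).find? (pvHitB cs) := by
      rw [find?_eq_head?_filter, find?_eq_head?_filter]
      congr 1
      apply List.filter_congr
      intro i hi
      have hi' := (PySem.List.mem_pyRange_one).1 hi
      exact pvHitA_eq_hitB cs n i (by omega)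
    -- forward: A's find? = head? of B's fwd list
    have hfwd : (PySem.List.pyRange target_len se 1).find? (pvHitB cs)
        = (((PySem.List.pyRange ss se 1).filter (pvHitB cs)).filter
            (fun i => decide (target_len ≤ i))).head? := by
      rw [hsplit, List.filter_append, List.filter_append, find?_eq_head?_filter]
      have hlo : ((PySem.List.pyRange ss target_len 1).filter (pvHitB cs)).filter
          (fun i => decide (target_len ≤ i)) = [] := by
        rw [List.filter_eq_nil_iff]
        intro i hi
        have hi' := (PySem.List.mem_pyRange_one).1 (List.mem_of_mem_filter hi)
        simp
        omega
      have hhi : ((PySem.List.pyRange target_len se 1).filter (pvHitB cs)).filter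
          (fun i => decide (target_len ≤ i))
          = (PySem.List.pyRange target_len se 1).filter (pvHitB cs) := by
        rw [List.filter_eq_self]
        intro i hi
        have hi' := (PySem.List.mem_pyRange_one).1 (List.mem_of_mem_filter hi)
        simp
        omega
      rw [hlo, hhi, List.nil_append]
    rw [hAfwd, hfwd]
    cases hcase : (((PySem.List.pyRange ss se 1).filter (pvHitB cs)).filter
        (fun i => decide (target_len ≤ i))) with
    | cons f rest => rfl
    | nil =>
      -- forward empty: no hit at or after target_len in the window
      have hnofwd : ∀ i, i ∈ PySem.List.pyRange target_len se 1 → pvHitB cs i = false := by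
        intro i hi
        have hi' := (PySem.List.mem_pyRange_one).1 hi
        by_contra hne
        have hb : pvHitB cs i = true := by
          cases hbb : pvHitB cs i with
          | false => exact absurd hbb hne
          | true => rfl
        have : i ∈ ((PySem.List.pyRange ss se 1).filter (pvHitB cs)).filter
            (fun i => decide (target_len ≤ i)) := by
          apply List.mem_filter.2
          refine ⟨List.mem_filter.2 ⟨?_, hb⟩, by simp; omega⟩
          exact (PySem.List.mem_pyRange_one).2 ⟨by omega, by omega⟩
        rw [hcase] at this
        exact absurd this (List.not_mem_nil)
      -- backward range is the reverse of [ss, target_len+1)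
      have hrev : PySem.List.pyRange target_len (ss - 1) (-1)
          = (PySem.List.pyRange ss (target_len + 1) 1).reverse := by
        have hplus : ss - 1 + 1 = ss := by omega
        rw [PySem.List.pyRange_neg_one_eq_reverse, hplus]
      have hback : (PySem.List.pyRange target_len (ss - 1) (-1)).find? (pvHitA cs n)
          = ((PySem.List.pyRange ss se 1).filter (pvHitB cs)).getLast? := by
        rw [hrev, find?_eq_head?_filter]
        have hcongr : (PySem.List.pyRange ss (target_len + 1) 1).reverse.filter (pvHitA cs n)
            = (PySem.List.pyRange ss (target_len + 1) 1).reverse.filter (pvHitB cs) := by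
          apply List.filter_congr
          intro i hi
          have hi' := (PySem.List.mem_pyRange_one).1 (List.mem_reverse.1 hi)
          exact pvHitA_eq_hitB cs n i (by omega)
        rw [hcongr, List.filter_reverse, List.head?_reverse]
        congr 1
        -- filter over [ss, tl+1) = filter over [ss, se), since no hits in [tl, se)
        have hsplit2 : PySem.List.pyRange ss se 1
            = PySem.List.pyRange ss (target_len + 1) 1 ++ PySem.List.pyRange (target_len + 1) se 1 :=
          PySem.List.pyRange_one_append ss (target_len + 1) se (by omega) (by omega)
        have hnil : (PySem.List.pyRange (target_len + 1) se 1).filter (pvHitB cs) = [] := by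
          rw [List.filter_eq_nil_iff]
          intro i hi
          have hi' := (PySem.List.mem_pyRange_one).1 hi
          have := hnofwd i ((PySem.List.mem_pyRange_one).2 ⟨by omega, by omega⟩)
          simp [this]
        rw [hsplit2, List.filter_append, hnil, List.append_nil]
      rw [hback]
      cases ((PySem.List.pyRange ss se 1).filter (pvHitB cs)).getLast? <;> rfl

-- ===== VERDICT (by name: the statement is the Claim_ definition above) =====
theorem find_nearest_punctuation_spec : Claim_equal_find_nearest_punctuation := by
  intro text target_len _ hpre
  exact find_nearest_punctuation_spec' text target_len hpre
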